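-- pv_equiv track=rewrite | github.com/prelipcean/obsidian-ai-refactor | demo_obsidian_refactor_ai_workflow.py | extract_sections_from_content
-- ===== SOURCE A (Python) =====
-- from typing import List, Dict, Tuple
--
-- def extract_sections_from_content(content: str) -> List[str]:
--     """
--     Finds all section headers (lines starting with #) in markdown content.
--     """
--     sections = []
--     lines = content.split('\n')
--
--     for line in lines:
--         line = line.strip()
--         if line.startswith('#'):
--             # Remove the # characters and clean up
--             section = line.lstrip('#').strip()
--             if section:
--                 sections.append(section)
--
--     return sections
-- ===== SOURCE B (Python) =====
-- def _drop_while(pred, chars):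
--     k = 0
--     while k < len(chars) and pred(chars[k]):
--         k += 1
--     return chars[k:]
--
--
-- def _proc_line(buf):
--     core = _drop_while(str.isspace, buf)
--     core = _drop_while(str.isspace, core[::-1])[::-1]
--     if core and core[0] == '#':
--         body = _drop_while(str.isspace, _drop_while(lambda c: c == '#', core))
--         if body:
--             return ''.join(body)
--     return None
--
--
-- def extract_sections_from_content(content):
--     sections = []
--     buf = []
--     for ch in content + '\n':
--         if ch == '\n':
--             s = _proc_line(buf)
--             if s is not None:
--                 sections.append(s)
--             buf = []
--         else:
--             buf.append(ch)
--     return sections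
-- ===== Notes on version B (the rewrite author's own statement) =====
-- stated objective: alternative
-- what changed: Replaces A's line-splitting plus per-line strip/startswith/lstrip/strip pipeline by a single character-level scan that buffers the current line and, at each newline, emits a header body with one helper that trims both ends and drops the leading run of hash marks.
import Mathlib
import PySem

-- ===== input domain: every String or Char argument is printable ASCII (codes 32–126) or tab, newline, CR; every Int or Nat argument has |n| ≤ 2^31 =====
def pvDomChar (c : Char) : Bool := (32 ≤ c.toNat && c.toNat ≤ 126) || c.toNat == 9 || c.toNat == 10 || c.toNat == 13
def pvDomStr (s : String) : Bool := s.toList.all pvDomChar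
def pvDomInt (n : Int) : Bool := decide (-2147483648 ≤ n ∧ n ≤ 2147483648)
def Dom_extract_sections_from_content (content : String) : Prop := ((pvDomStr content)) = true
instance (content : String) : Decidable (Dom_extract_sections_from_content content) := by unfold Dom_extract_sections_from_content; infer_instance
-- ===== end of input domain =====

-- B replaces A's split('\n')/strip/lstrip pipeline by a single character-level scan
-- with a line buffer (objective: alternative, same linear cost).

-- ===== PORT A =====
-- transliteration of A: split content on '\n', strip each line, keep lines starting
-- with '#', drop the leading '#' run (lstrip('#') has no PySem primitive: ported by
-- hand as dropWhile (· == '#'), exact since lstrip drops exactly the leading run),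
-- strip again, append when non-empty.
def extract_sections_from_content (content : String) : List String :=
  (PySem.Chars.splitOn content.toList ['\n']).foldl
    (fun sections line =>
      let line := PySem.Chars.strip line
      if PySem.Chars.startswith line ['#'] then
        let sec := PySem.Chars.strip (List.dropWhile (fun c => c == '#') line)
        if sec.isEmpty then sections else sections ++ [String.ofList sec]
      else sections)
    []

-- ===== PORT B =====
-- Source B's _proc_line: trim whitespace from both ends of the buffered line; if it
-- starts with '#', drop the '#' run and the whitespace after it; return the body
-- when non-empty.
def pvProcLine (buf : List Char) : Option (List Char) :=
  let core := buf.dropWhile PySem.Chars.isspace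
  let core := (core.reverse.dropWhile PySem.Chars.isspace).reverse
  match core with
  | '#' :: _ =>
      let body := (core.dropWhile (fun c => c == '#')).dropWhile PySem.Chars.isspace
      if body.isEmpty then none else some body
  | _ => none

-- Source B's main loop: one pass over content + '\n', buffering the current line.
def extract_sections_from_content_alt (content : String) : List String :=
  ((content.toList ++ ['\n']).foldl
    (fun (st : List String × List Char) ch =>
      if ch == '\n' then
        match pvProcLine st.2 with
        | some body => (st.1 ++ [String.ofList body], [])
        | none => (st.1, [])
      else (st.1, st.2 ++ [ch]))
    ([], [])).1

-- ===== PRECONDITION & SPEC =====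
def Spec_extract_sections_from_content (content : String) (out : List String) : Prop := out = extract_sections_from_content_alt content
instance (content : String) (out : List String) : Decidable (Spec_extract_sections_from_content content out) := by unfold Spec_extract_sections_from_content; infer_instance

-- ===== CLAIM (what is proved, stated in full; the proofs are below) =====
def Claim_equal_extract_sections_from_content : Prop := ∀ (content : String), Dom_extract_sections_from_content content → Spec_extract_sections_from_content content (extract_sections_from_content content)

-- ===== LEMMAS AND PROOFS =====

-- A's loop body, named for the proofs.
def pvLineStep (sections : List String) (line : List Char) : List String :=
  let line := PySem.Chars.strip line
  if PySem.Chars.startswith line ['#'] then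
    let sec := PySem.Chars.strip (List.dropWhile (fun c => c == '#') line)
    if sec.isEmpty then sections else sections ++ [String.ofList sec]
  else sections

-- B's loop body, named for the proofs.
def pvScanStep (st : List String × List Char) (ch : Char) : List String × List Char :=
  if ch == '\n' then
    match pvProcLine st.2 with
    | some body => (st.1 ++ [String.ofList body], [])
    | none => (st.1, [])
  else (st.1, st.2 ++ [ch])

-- prepend a prefix onto the first piece of a split
def pvConsHead (pre : List Char) : List (List Char) → List (List Char)
  | [] => [pre]
  | h :: t => (pre ++ h) :: t

-- reference splitter on '\n'
def pvSplit : List Char → List (List Char)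
  | [] => [[]]
  | c :: rest => if c = '\n' then [] :: pvSplit rest else pvConsHead [c] (pvSplit rest)

lemma pvSplit_ne_nil (cs : List Char) : pvSplit cs ≠ [] := by
  cases cs with
  | nil => simp [pvSplit]
  | cons c rest =>
      simp only [pvSplit]
      split
      · simp
      · cases h : pvSplit rest <;> simp [pvConsHead]

lemma pvConsHead_nil (m : List (List Char)) (hm : m ≠ []) : pvConsHead [] m = m := by
  cases m with
  | nil => exact absurd rfl hm
  | cons h t => simp [pvConsHead]

lemma pvConsHead_consHead (pre c : List Char) (m : List (List Char)) :
    pvConsHead pre (pvConsHead c m) = pvConsHead (pre ++ c) m := by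
  cases m <;> simp [pvConsHead]

lemma pvSplitOn_go_eq : ∀ (fuel : Nat) (l cur : List Char) (acc : List (List Char)),
    l.length < fuel →
    PySem.Chars.splitOn.go ['\n'] fuel l cur acc
      = acc.reverse ++ pvConsHead cur.reverse (pvSplit l) := by
  intro fuel
  induction fuel with
  | zero => intro l cur acc h; omega
  | succ n ih =>
      intro l cur acc h
      cases l with
      | nil =>
          simp [PySem.Chars.splitOn.go, pvSplit, pvConsHead]
      | cons c rest =>
          by_cases hc : c = '\n'
          · subst hc
            have hp : List.isPrefixOf ['\n'] ('\n' :: rest) = true := by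
              simp [List.isPrefixOf]
            simp only [PySem.Chars.splitOn.go, hp, if_true, List.length_cons,
              List.drop_succ_cons, List.length_nil, List.drop_zero]
            rw [ih rest [] (cur.reverse :: acc) (by simpa using Nat.lt_of_succ_lt_succ h)]
            simp only [List.reverse_nil]
            rw [pvConsHead_nil _ (pvSplit_ne_nil rest)]
            simp [pvSplit, pvConsHead]
          · have hp : List.isPrefixOf ['\n'] (c :: rest) = false := by
              simp [List.isPrefixOf]
              exact fun hh => absurd hh.symm hc
            simp only [PySem.Chars.splitOn.go, hp, Bool.false_eq_true, if_false]
            rw [ih rest (c :: cur) acc (by simpa using Nat.lt_of_succ_lt_succ h)]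
            simp only [pvSplit, hc, if_false, List.reverse_cons]
            rw [pvConsHead_consHead]

lemma pvSplitOn_eq (cs : List Char) :
    PySem.Chars.splitOn cs ['\n'] = pvSplit cs := by
  unfold PySem.Chars.splitOn
  rw [pvSplitOn_go_eq (cs.length + 1) cs [] [] (by omega)]
  simp [pvConsHead_nil _ (pvSplit_ne_nil cs)]

-- a prefix of a dropWhile-fixed list is dropWhile-fixed
lemma pvDropWhile_eq_self_of_prefix (p : Char → Bool) :
    ∀ {l m : List Char}, l <+: m → m.dropWhile p = m → l.dropWhile p = l := by
  intro l m hp hm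
  cases l with
  | nil => simp
  | cons a l' =>
      obtain ⟨t, ht⟩ := hp
      simp only [List.cons_append] at ht
      have hpa : p a = false := by
        by_contra hpa
        have hpa' : p a = true := by revert hpa; cases p a <;> simp
        rw [← ht] at hm
        rw [List.dropWhile_cons, hpa'] at hm
        simp only [if_true] at hm
        have h1 := List.length_dropWhile_le p (l' ++ t)
        have h2 := congrArg List.length hm
        simp only [List.length_cons, List.length_append] at h1 h2
        omega
      simp [hpa]

-- per-line: A's loop body computes exactly B's _proc_line result
lemma pvLineStep_eq (secs : List String) (line : List Char) :
    pvLineStep secs line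
      = secs ++ ((pvProcLine line).elim [] fun b => [String.ofList b]) := by
  unfold pvLineStep pvProcLine
  simp only [PySem.Chars.strip, PySem.Chars.lstrip, PySem.Chars.rstrip]
  generalize hcore :
    ((line.dropWhile PySem.Chars.isspace).reverse.dropWhile PySem.Chars.isspace).reverse = core
  have hfix : core.reverse.dropWhile PySem.Chars.isspace = core.reverse := by
    rw [← hcore, List.reverse_reverse, List.dropWhile_idempotent]
  cases core with
  | nil => simp [PySem.Chars.startswith, List.isPrefixOf]
  | cons c cs =>
      by_cases hc : c = '#'
      · subst hc
        have hsw : PySem.Chars.startswith ('#' :: cs) ['#'] = true := by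
          simp [PySem.Chars.startswith, List.isPrefixOf]
        simp only [hsw]
        simp only [if_true]
        -- the second strip's rstrip is the identity: its argument is a suffix of core,
        -- and core has no trailing whitespace
        have hsuf : (((('#' :: cs).dropWhile fun c => c == '#').dropWhile
            PySem.Chars.isspace)) <:+ ('#' :: cs) :=
          (List.dropWhile_suffix _).trans (List.dropWhile_suffix _)
        have hpre := List.reverse_prefix.mpr hsuf
        have hrfix := pvDropWhile_eq_self_of_prefix PySem.Chars.isspace hpre hfix
        rw [hrfix]
        simp only [List.reverse_reverse]
        cases ((('#' :: cs).dropWhile fun c => c == '#').dropWhile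
            PySem.Chars.isspace).isEmpty <;> simp
      · have hsw : PySem.Chars.startswith (c :: cs) ['#'] = false := by
          simp [PySem.Chars.startswith, List.isPrefixOf]
          exact fun hh => absurd hh.symm hc
        simp [hsw, hc]

-- the scan over chars ++ ['\n'] is A's fold over the split lines
lemma pvScan_eq : ∀ (cs : List Char) (secs : List String) (buf : List Char),
    ((cs ++ ['\n']).foldl pvScanStep (secs, buf)).1
      = (pvConsHead buf (pvSplit cs)).foldl pvLineStep secs := by
  intro cs
  induction cs with
  | nil =>
      intro secs buf
      simp only [List.nil_append, List.foldl_cons, List.foldl_nil, pvSplit, pvConsHead,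
        List.append_nil, pvScanStep, pvLineStep_eq]
      cases pvProcLine buf <;> simp
  | cons c cs ih =>
      intro secs buf
      by_cases hc : c = '\n'
      · subst hc
        have hstep : pvScanStep (secs, buf) '\n' = (pvLineStep secs buf, []) := by
          rw [pvLineStep_eq]
          simp only [pvScanStep]
          cases pvProcLine buf <;> simp
        simp only [List.cons_append, List.foldl_cons, hstep, ih,
          pvConsHead_nil _ (pvSplit_ne_nil cs), pvSplit]
        simp [pvConsHead]
      · have hstep : pvScanStep (secs, buf) c = (secs, buf ++ [c]) := by
          simp [pvScanStep, hc]
        simp only [List.cons_append, List.foldl_cons, hstep, ih, pvSplit, hc, if_false,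
          pvConsHead_consHead]

-- ===== VERDICT (by name: the statement is the Claim_ definition above) =====
theorem extract_sections_from_content_spec : Claim_equal_extract_sections_from_content := by
  intro content _
  show extract_sections_from_content content = extract_sections_from_content_alt content
  unfold extract_sections_from_content extract_sections_from_content_alt
  rw [pvSplitOn_eq]
  show (pvSplit content.toList).foldl pvLineStep []
      = ((content.toList ++ ['\n']).foldl pvScanStep ([], [])).1
  rw [pvScan_eq, pvConsHead_nil _ (pvSplit_ne_nil _)]
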